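-- pv_equiv track=rewrite | github.com/ZzakB/MolNotator | MolNotator/others/global_functions.py | clean_house_table_neutrals
-- ===== SOURCE A (Python) =====
-- def clean_house_table_neutrals(next_list, house_list, compatibles_list, left_list, houses):
--     """Removes houses that finished expanding (no compatible cohorts left) from
--     the house table, and exports them to the houses list.
--     """
--     export_idx = [i for i in range(len(left_list)) if left_list[i] == 0]
--     export_idx.sort(reverse = True)
--     for i in export_idx:
--         new_house = house_list[i] + [next_list[i]]
--         new_house = list(set(new_house))
--         new_house.sort()
--         houses.append(new_house)
--         next_list.pop(i)
--         house_list.pop(i)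
--         compatibles_list.pop(i)
--         left_list.pop(i)
--     return next_list, house_list, compatibles_list, left_list, houses
-- ===== SOURCE B (Python) =====
-- def clean_house_table_neutrals(next_list, house_list, compatibles_list, left_list, houses):
--     """Collect the indices of finished houses once, export them in descending
--     index order, then rebuild the four parallel lists by a single filtering pass
--     instead of popping index by index. Mutates the lists in place like the
--     original (slice assignment keeps object identity)."""
--     zero_idx = [i for i, v in enumerate(left_list) if v == 0]
--     for i in reversed(zero_idx):
--         houses.append(sorted(set(house_list[i] + [next_list[i]])))
--     zs = set(zero_idx)
--     next_list[:] = [v for j, v in enumerate(next_list) if j not in zs]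
--     house_list[:] = [v for j, v in enumerate(house_list) if j not in zs]
--     compatibles_list[:] = [v for j, v in enumerate(compatibles_list) if j not in zs]
--     left_list[:] = [v for j, v in enumerate(left_list) if j not in zs]
--     return next_list, house_list, compatibles_list, left_list, houses
-- ===== Notes on version B (the rewrite author's own statement) =====
-- stated objective: alternative
-- what changed: A repeatedly pops each finished house out of the four parallel lists index by index (descending); B collects the zero indices in one enumerate pass, appends the exports in descending index order, and rebuilds each parallel list in a single filtering pass against the index set.
import Mathlib
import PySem

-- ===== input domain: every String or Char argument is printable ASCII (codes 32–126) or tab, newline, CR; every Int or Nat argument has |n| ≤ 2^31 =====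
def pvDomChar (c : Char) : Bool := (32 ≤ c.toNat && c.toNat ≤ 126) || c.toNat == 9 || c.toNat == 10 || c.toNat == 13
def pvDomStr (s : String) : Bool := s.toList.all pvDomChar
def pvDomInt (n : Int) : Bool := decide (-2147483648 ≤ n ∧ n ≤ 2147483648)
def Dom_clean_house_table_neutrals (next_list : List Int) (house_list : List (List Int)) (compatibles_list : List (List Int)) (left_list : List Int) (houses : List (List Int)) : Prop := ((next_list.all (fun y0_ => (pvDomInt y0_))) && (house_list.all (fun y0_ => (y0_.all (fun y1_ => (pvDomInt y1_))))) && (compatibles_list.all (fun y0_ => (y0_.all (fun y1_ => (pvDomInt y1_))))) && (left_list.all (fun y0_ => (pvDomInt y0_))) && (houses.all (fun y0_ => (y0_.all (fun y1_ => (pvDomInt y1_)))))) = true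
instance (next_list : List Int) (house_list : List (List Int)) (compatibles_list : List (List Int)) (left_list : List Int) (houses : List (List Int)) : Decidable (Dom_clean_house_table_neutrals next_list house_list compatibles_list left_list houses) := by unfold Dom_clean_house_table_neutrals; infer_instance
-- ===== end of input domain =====

-- B rebuilds the four parallel lists by one filtering pass against the set of finished-house
-- indices instead of A's index-by-index pops (objective: alternative structure, same cost);
-- both mutate the Python lists in place, the equivalence proved is about the return value.
-- ===== PORT A =====
-- A pops finished houses from the four parallel lists index by index, descending.
-- Python's list(set(x)); x.sort(): the hash iteration order of the set is erased by the
-- sort, so porting it as sorted over the PySem.Set (distinct elements) is exact.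
-- pvStepA threads Option: none = an IndexError was raised (excluded by Pre_).
def pvStepA (st : Option (List Int × List (List Int) × List (List Int) × List Int × List (List Int))) (i : Int) : Option (List Int × List (List Int) × List (List Int) × List Int × List (List Int)) :=
  match st with
  | none => none
  | some (nl, hl, cl, ll, hs) =>
    match PySem.List.pyGet? hl i, PySem.List.pyGet? nl i with
    | some hi, some ni =>
      let new_house := PySem.List.sorted (PySem.Set.ofList (hi ++ [ni])) (fun v => v) false
      let hs2 := hs ++ [new_house]
      match PySem.List.pop? nl i, PySem.List.pop? hl i, PySem.List.pop? cl i, PySem.List.pop? ll i with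
      | some pn, some ph, some pc, some pl => some (pn.2, ph.2, pc.2, pl.2, hs2)
      | _, _, _, _ => none
    | _, _ => none

def clean_house_table_neutrals (next_list : List Int) (house_list : List (List Int)) (compatibles_list : List (List Int)) (left_list : List Int) (houses : List (List Int)) : List Int × List (List Int) × List (List Int) × List Int × List (List Int) :=
  let export_idx := (PySem.List.pyRange 0 (left_list.length : Int) 1).filter (fun i => PySem.List.pyGet? left_list i == some 0)
  let export_idx2 := PySem.List.sorted export_idx (fun v => v) true
  match export_idx2.foldl pvStepA (some (next_list, house_list, compatibles_list, left_list, houses)) with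
  | some st => st
  | none => (next_list, house_list, compatibles_list, left_list, houses)  -- IndexError; unreachable under Pre_

-- ===== PORT B =====
-- B: one enumerate pass collects the zero indices; exports appended in descending index
-- order; each parallel list rebuilt by a single filter against the index set.
-- pyGetD is total; the out-of-range (IndexError) inputs are excluded by Pre_.
def clean_house_table_neutrals_alt (next_list : List Int) (house_list : List (List Int)) (compatibles_list : List (List Int)) (left_list : List Int) (houses : List (List Int)) : List Int × List (List Int) × List (List Int) × List Int × List (List Int) :=
  let zero_idx : List Int := ((PySem.List.enumerate left_list 0).filter (fun p => p.2 == 0)).map (fun p => p.1)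
  let hs2 := zero_idx.reverse.foldl (fun acc i =>
      acc ++ [PySem.List.sorted (PySem.Set.ofList (PySem.List.pyGetD house_list i [] ++ [PySem.List.pyGetD next_list i 0])) (fun v => v) false]) houses
  let zs : PySem.Set Int := PySem.Set.ofList zero_idx
  ( ((PySem.List.enumerate next_list 0).filter (fun p => !(PySem.Set.contains zs p.1))).map (fun p => p.2),
    ((PySem.List.enumerate house_list 0).filter (fun p => !(PySem.Set.contains zs p.1))).map (fun p => p.2),
    ((PySem.List.enumerate compatibles_list 0).filter (fun p => !(PySem.Set.contains zs p.1))).map (fun p => p.2),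
    ((PySem.List.enumerate left_list 0).filter (fun p => !(PySem.Set.contains zs p.1))).map (fun p => p.2),
    hs2 )

-- ===== PRECONDITION & SPEC =====
-- Exactly the inputs on which the Python A returns: every index of a zero entry of
-- left_list must be a valid index of the three other parallel lists, otherwise A raises
-- IndexError (on the access house_list[i]/next_list[i] or on one of the pops).
def Pre_clean_house_table_neutrals (next_list : List Int) (house_list : List (List Int)) (compatibles_list : List (List Int)) (left_list : List Int) (houses : List (List Int)) : Prop :=
  ∀ i : Nat, i < left_list.length → left_list.getD i 1 = 0 →
    i < next_list.length ∧ i < house_list.length ∧ i < compatibles_list.length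
instance (next_list : List Int) (house_list : List (List Int)) (compatibles_list : List (List Int)) (left_list : List Int) (houses : List (List Int)) : Decidable (Pre_clean_house_table_neutrals next_list house_list compatibles_list left_list houses) := by unfold Pre_clean_house_table_neutrals; infer_instance

def pvWitness_clean_house_table_neutrals : List Int × List (List Int) × List (List Int) × List Int × List (List Int) :=
  ([1, 2], [[3], [4]], [[5], []], [0, 1], [])

def Spec_clean_house_table_neutrals (next_list : List Int) (house_list : List (List Int)) (compatibles_list : List (List Int)) (left_list : List Int) (houses : List (List Int)) (out : List Int × List (List Int) × List (List Int) × List Int × List (List Int)) : Prop := out = clean_house_table_neutrals_alt next_list house_list compatibles_list left_list houses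
instance (next_list : List Int) (house_list : List (List Int)) (compatibles_list : List (List Int)) (left_list : List Int) (houses : List (List Int)) (out : List Int × List (List Int) × List (List Int) × List Int × List (List Int)) : Decidable (Spec_clean_house_table_neutrals next_list house_list compatibles_list left_list houses out) := by unfold Spec_clean_house_table_neutrals; infer_instance

-- ===== CLAIM (what is proved, stated in full; the proofs are below) =====
def Claim_equal_clean_house_table_neutrals : Prop := ∀ (next_list : List Int) (house_list : List (List Int)) (compatibles_list : List (List Int)) (left_list : List Int) (houses : List (List Int)), Dom_clean_house_table_neutrals next_list house_list compatibles_list left_list houses → Pre_clean_house_table_neutrals next_list house_list compatibles_list left_list houses → Spec_clean_house_table_neutrals next_list house_list compatibles_list left_list houses (clean_house_table_neutrals next_list house_list compatibles_list left_list houses)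

-- ===== LEMMAS AND PROOFS =====

-- zIdxN xs s = indices (from start s) of the zero entries of xs
def zIdxN : List Int → Nat → List Nat
  | [], _ => []
  | x :: xs, s => if x = 0 then s :: zIdxN xs (s + 1) else zIdxN xs (s + 1)

-- kIdx zs xs c = xs with the elements whose (absolute, from c) index lies in zs removed
def kIdx {a : Type} (zs : List Nat) : List a → Nat → List a
  | [], _ => []
  | x :: xs, c => if c ∈ zs then kIdx zs xs (c + 1) else x :: kIdx zs xs (c + 1)

theorem zIdxN_mem (xs : List Int) : ∀ (s i : Nat), i ∈ zIdxN xs s →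
    ∃ k, i = s + k ∧ k < xs.length ∧ xs.getD k 1 = 0 := by
  induction xs with
  | nil => intro s i h; simp [zIdxN] at h
  | cons x xs ih =>
    intro s i h
    simp only [zIdxN] at h
    by_cases hx : x = 0
    · rw [if_pos hx] at h
      rcases List.mem_cons.mp h with rfl | h
      · exact ⟨0, by omega, by simp, by simp [hx]⟩
      · obtain ⟨k, rfl, hk, hz⟩ := ih (s + 1) i h
        exact ⟨k + 1, by omega, by simp; omega, by simpa using hz⟩
    · rw [if_neg hx] at h
      obtain ⟨k, rfl, hk, hz⟩ := ih (s + 1) i h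
      exact ⟨k + 1, by omega, by simp; omega, by simpa using hz⟩

theorem zIdxN_lb (xs : List Int) (s i : Nat) (h : i ∈ zIdxN xs s) : s ≤ i := by
  obtain ⟨k, rfl, -, -⟩ := zIdxN_mem xs s i h; omega

theorem zIdxN_pairwise (xs : List Int) : ∀ s : Nat, (zIdxN xs s).Pairwise (· < ·) := by
  induction xs with
  | nil => intro s; simp [zIdxN]
  | cons x xs ih =>
    intro s
    simp only [zIdxN]
    split
    · refine List.Pairwise.cons ?_ (ih (s + 1))
      intro j hj
      have := zIdxN_lb xs (s + 1) j hj
      omega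
    · exact ih (s + 1)

theorem zIdxN_shift (xs : List Int) : ∀ s : Nat, zIdxN xs (s + 1) = (zIdxN xs s).map (· + 1) := by
  induction xs with
  | nil => intro s; simp [zIdxN]
  | cons x xs ih =>
    intro s
    simp only [zIdxN]
    split
    · simp [ih (s + 1)]
    · exact ih (s + 1)

-- A's zero-index comprehension, in Nat form
theorem A1 (xs : List Int) : (List.range xs.length).filter (fun k => xs[k]? == some 0) = zIdxN xs 0 := by
  induction xs with
  | nil => simp [zIdxN]
  | cons x xs ih =>
    have hcomp : ((fun k => (x :: xs)[k]? == some (0 : Int)) ∘ (fun k => k + 1)) = (fun k => xs[k]? == some (0 : Int)) := by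
      funext k; simp
    rw [List.length_cons, List.range_succ_eq_map, List.filter_cons, List.filter_map, hcomp, ih]
    simp only [zIdxN, List.getElem?_cons_zero, Option.some.injEq, beq_iff_eq, zIdxN_shift xs 0]

-- B's zero-index comprehension
theorem B1 (xs : List Int) : ∀ s : Nat,
    ((PySem.List.enumerate xs (s : Int)).filter (fun p => p.2 == 0)).map (fun p => p.1)
      = (zIdxN xs s).map (fun (k : Nat) => (k : Int)) := by
  induction xs with
  | nil => intro s; simp [PySem.List.enumerate_nil, zIdxN]
  | cons x xs ih =>
    intro s
    have hs1 : (s : Int) + 1 = ((s + 1 : Nat) : Int) := by push_cast; ring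
    have ihs := ih (s + 1)
    push_cast at ihs
    by_cases hx : x = 0
    · simp only [zIdxN, if_pos hx]
      simp [PySem.List.enumerate_cons, hx, ihs]
    · simp only [zIdxN, if_neg hx]
      simp [PySem.List.enumerate_cons, hx, ihs]

theorem kIdx_all_lt {a : Type} (zs : List Nat) : ∀ (xs : List a) (c : Nat), (∀ j ∈ zs, j < c) → kIdx zs xs c = xs := by
  intro xs
  induction xs with
  | nil => intro c _; rfl
  | cons x xs ih =>
    intro c hc
    have hnot : c ∉ zs := fun h => absurd (hc c h) (by omega)
    simp only [kIdx, if_neg hnot]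
    rw [ih (c + 1) (fun j hj => Nat.lt_succ_of_lt (hc j hj))]

theorem kIdx_erase {a : Type} : ∀ (xs : List a) (c i : Nat) (zs : List Nat), (∀ j ∈ zs, j < c + i) →
    kIdx zs (xs.eraseIdx i) c = kIdx ((i + c) :: zs) xs c := by
  intro xs
  induction xs with
  | nil => intro c i zs _; simp [List.eraseIdx, kIdx]
  | cons x xs ih =>
    intro c i zs hzs
    match i with
    | 0 =>
      have h1 : kIdx zs xs c = xs := kIdx_all_lt zs xs c (by simpa using hzs)
      have h2 : kIdx ((0 + c) :: zs) xs (c + 1) = xs := by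
        refine kIdx_all_lt _ xs (c + 1) ?_
        intro j hj
        rcases List.mem_cons.mp hj with rfl | hj
        · omega
        · have := hzs j hj; omega
      simp only [List.eraseIdx, kIdx]
      rw [if_pos (by simp), h1, h2]
    | i + 1 =>
      have hstep : kIdx zs (xs.eraseIdx i) (c + 1) = kIdx ((i + (c + 1)) :: zs) xs (c + 1) :=
        ih (c + 1) i zs (by intro j hj; have := hzs j hj; omega)
      have hmem : (c ∈ (i + 1 + c) :: zs) ↔ (c ∈ zs) := by
        constructor
        · intro h
          rcases List.mem_cons.mp h with h | h
          · omega
          · exact h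
        · exact fun h => List.mem_cons_of_mem _ h
      have harith : i + (c + 1) = i + 1 + c := by omega
      simp only [List.eraseIdx, kIdx]
      by_cases hcz : c ∈ zs
      · rw [if_pos hcz, if_pos (hmem.mpr hcz), hstep, harith]
      · rw [if_neg hcz, if_neg (fun h => hcz (hmem.mp h)), hstep, harith]

theorem kIdx_congr {a : Type} (zs zs' : List Nat) (hm : ∀ j, j ∈ zs ↔ j ∈ zs') :
    ∀ (xs : List a) (c : Nat), kIdx zs xs c = kIdx zs' xs c := by
  intro xs
  induction xs with
  | nil => intro c; rfl
  | cons x xs ih =>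
    intro c
    simp only [kIdx]
    by_cases hc : c ∈ zs
    · rw [if_pos hc, if_pos ((hm c).mp hc), ih]
    · rw [if_neg hc, if_neg (fun h => hc ((hm c).mpr h)), ih]

theorem foldl_erase_desc {a : Type} : ∀ (is : List Nat), is.Pairwise (· > ·) →
    ∀ xs : List a, is.foldl (fun ys i => ys.eraseIdx i) xs = kIdx is xs 0 := by
  intro is
  induction is with
  | nil => intro _ xs; exact (kIdx_all_lt [] xs 0 (by simp)).symm
  | cons i is ih =>
    intro hp xs
    have hhead : ∀ j ∈ is, j < i := fun j hj => (List.pairwise_cons.mp hp).1 j hj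
    have htail := (List.pairwise_cons.mp hp).2
    simp only [List.foldl_cons]
    rw [ih htail (xs.eraseIdx i),
        kIdx_erase (xs := xs) (c := 0) (i := i) (zs := is) (by simpa using hhead)]
    simp

-- B's filtering pass computes kIdx
theorem B2 {a : Type} (zN : List Nat) : ∀ (xs : List a) (s : Nat),
    ((PySem.List.enumerate xs (s : Int)).filter (fun p => !(decide (p.1 ∈ zN.map (fun (k : Nat) => (k : Int)))))).map (fun p => p.2)
      = kIdx zN xs s := by
  intro xs
  induction xs with
  | nil => intro s; simp [PySem.List.enumerate_nil, kIdx]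
  | cons x xs ih =>
    intro s
    have hs1 : (s : Int) + 1 = ((s + 1 : Nat) : Int) := by push_cast; ring
    have hmem : ((s : Int) ∈ zN.map (fun (k : Nat) => (k : Int))) ↔ s ∈ zN := by
      simp [List.mem_map]
    have ihs := ih (s + 1)
    push_cast at ihs
    rw [PySem.List.enumerate_cons, List.filter_cons]
    simp only [kIdx]
    by_cases hc : s ∈ zN
    · rw [if_pos hc, if_neg (by simp [hmem, hc])]
      exact ihs
    · rw [if_neg hc, if_pos (by simp [hmem, hc])]
      simp only [List.map_cons]
      rw [ihs]

-- the main invariant of A's pop loop over strictly descending in-range indices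
theorem stepA_main : ∀ (is : List Nat) (nl : List Int) (hl cl : List (List Int)) (ll : List Int) (hs : List (List Int)),
    is.Pairwise (· > ·) →
    (∀ i ∈ is, i < nl.length ∧ i < hl.length ∧ i < cl.length ∧ i < ll.length) →
    (is.map (fun (i : Nat) => (i : Int))).foldl pvStepA (some (nl, hl, cl, ll, hs)) =
      some (is.foldl (fun ys i => ys.eraseIdx i) nl,
            is.foldl (fun (ys : List (List Int)) i => ys.eraseIdx i) hl,
            is.foldl (fun (ys : List (List Int)) i => ys.eraseIdx i) cl,
            is.foldl (fun (ys : List Int) i => ys.eraseIdx i) ll,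
            hs ++ is.map (fun i => PySem.List.sorted (PySem.Set.ofList (hl.getD i [] ++ [nl.getD i 0])) (fun v => v) false)) := by
  intro is
  induction is with
  | nil => intro nl hl cl ll hs _ _; simp
  | cons i is ih =>
    intro nl hl cl ll hs hp hb
    obtain ⟨hin, hih, hic, hil⟩ := hb i (List.mem_cons_self ..)
    have hhead : ∀ j ∈ is, j < i := fun j hj => (List.pairwise_cons.mp hp).1 j hj
    have htail := (List.pairwise_cons.mp hp).2
    have e1 : PySem.List.pyGet? hl (i : Int) = some hl[i] := by
      rw [PySem.List.pyGet?_natCast]; exact List.getElem?_eq_getElem hih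
    have e2 : PySem.List.pyGet? nl (i : Int) = some nl[i] := by
      rw [PySem.List.pyGet?_natCast]; exact List.getElem?_eq_getElem hin
    have p1 := PySem.List.pop?_natCast (xs := nl) (n := i) hin
    have p2 := PySem.List.pop?_natCast (xs := hl) (n := i) hih
    have p3 := PySem.List.pop?_natCast (xs := cl) (n := i) hic
    have p4 := PySem.List.pop?_natCast (xs := ll) (n := i) hil
    have hstep : pvStepA (some (nl, hl, cl, ll, hs)) (i : Int) =
        some (nl.eraseIdx i, hl.eraseIdx i, cl.eraseIdx i, ll.eraseIdx i,
              hs ++ [PySem.List.sorted (PySem.Set.ofList (hl[i] ++ [nl[i]])) (fun v => v) false]) := by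
      simp only [pvStepA, e1, e2, p1, p2, p3, p4]
    have hbounds : ∀ j ∈ is, j < (nl.eraseIdx i).length ∧ j < (hl.eraseIdx i).length ∧
        j < (cl.eraseIdx i).length ∧ j < (ll.eraseIdx i).length := by
      intro j hj
      have hji : j < i := hhead j hj
      simp only [List.length_eraseIdx]
      refine ⟨?_, ?_, ?_, ?_⟩ <;> split <;> omega
    have gE : ∀ {b : Type} (l : List b) (k j : Nat) (d : b), j < k → (l.eraseIdx k).getD j d = l.getD j d := by
      intro b l k j d h
      rw [List.getD_eq_getElem?_getD, List.getD_eq_getElem?_getD, List.getElem?_eraseIdx_of_lt h]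
    have hmap : is.map (fun j => PySem.List.sorted (PySem.Set.ofList ((hl.eraseIdx i).getD j [] ++ [(nl.eraseIdx i).getD j 0])) (fun v => v) false)
              = is.map (fun j => PySem.List.sorted (PySem.Set.ofList (hl.getD j [] ++ [nl.getD j 0])) (fun v => v) false) := by
      refine List.map_congr_left ?_
      intro j hj
      rw [gE hl i j [] (hhead j hj), gE nl i j 0 (hhead j hj)]
    have hget1 : hl[i] = hl.getD i [] := (List.getD_eq_getElem hl [] hih).symm
    have hget2 : nl[i] = nl.getD i 0 := (List.getD_eq_getElem nl 0 hin).symm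
    rw [List.map_cons, List.foldl_cons]
    rw [hstep, ih _ _ _ _ _ htail hbounds, hmap, hget1, hget2]
    simp [List.append_assoc]

-- ===== VERDICT (by name: the statement is the Claim_ definition above) =====
-- helper: reverse-of-map commutation for the cast of the index list
theorem castRev (zN : List Nat) :
    ((zN.map (fun (k : Nat) => (k : Int))).reverse) = zN.reverse.map (fun (k : Nat) => (k : Int)) :=
  (List.map_reverse).symm

theorem clean_house_table_neutrals_spec : Claim_equal_clean_house_table_neutrals := by
  intro nl hl cl ll hs _dom hpre
  unfold Spec_clean_house_table_neutrals clean_house_table_neutrals clean_house_table_neutrals_alt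
  -- the zero-index list, ascending and descending
  have hZmem : ∀ i ∈ zIdxN ll 0, i < ll.length ∧ ll.getD i 1 = 0 := by
    intro i hi
    obtain ⟨k, hik, hkl, hkz⟩ := zIdxN_mem ll 0 i hi
    have : i = k := by omega
    subst this
    exact ⟨hkl, hkz⟩
  have hDpw : ((zIdxN ll 0).reverse).Pairwise (· > ·) := by
    rw [List.pairwise_reverse]
    exact zIdxN_pairwise ll 0
  -- A's export_idx is the ascending zero-index list
  have hexp : (PySem.List.pyRange 0 (ll.length : Int) 1).filter (fun i => PySem.List.pyGet? ll i == some 0)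
      = (zIdxN ll 0).map (fun (k : Nat) => (k : Int)) := by
    rw [PySem.List.pyRange_zero_natCast, List.filter_map]
    have hc : ((fun i => PySem.List.pyGet? ll i == some 0) ∘ (fun (k : Nat) => (k : Int)))
        = (fun k => ll[k]? == some (0 : Int)) := by
      funext k; simp [PySem.List.pyGet?_natCast]
    rw [hc, A1]
  -- sorting it reverse=True yields the descending list
  have hIpw : ((zIdxN ll 0).reverse.map (fun (k : Nat) => (k : Int))).Pairwise (fun a b => b < a) := by
    refine List.Pairwise.map _ ?_ hDpw
    intro a b hab
    exact_mod_cast hab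
  have hsorted : PySem.List.sorted ((zIdxN ll 0).map (fun (k : Nat) => (k : Int))) (fun v => v) true
      = (zIdxN ll 0).reverse.map (fun (k : Nat) => (k : Int)) := by
    refine PySem.List.sorted_rev_eq_of_perm_of_pairwise_gt _ _ _ ?_ hIpw
    rw [← castRev]
    exact List.reverse_perm _
  -- run A's loop
  have hbounds : ∀ i ∈ (zIdxN ll 0).reverse, i < nl.length ∧ i < hl.length ∧ i < cl.length ∧ i < ll.length := by
    intro i hi
    rw [List.mem_reverse] at hi
    obtain ⟨hill, hiz⟩ := hZmem i hi
    obtain ⟨h1, h2, h3⟩ := hpre i hill hiz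
    exact ⟨h1, h2, h3, hill⟩
  have hfold := stepA_main ((zIdxN ll 0).reverse) nl hl cl ll hs hDpw hbounds
  simp only [hexp, hsorted]
  rw [hfold]
  -- B's zero_idx
  have hz0 : ((PySem.List.enumerate ll 0).filter (fun p => p.2 == 0)).map (fun p => p.1)
      = (zIdxN ll 0).map (fun (k : Nat) => (k : Int)) := by
    have hb1 := B1 ll 0
    simp only [Nat.cast_zero] at hb1
    rw [hb1]
  simp only [hz0]
  -- B's filtering passes compute kIdx, B's membership test is membership in zero_idx
  have hfilt : ∀ {b : Type} (xs : List b),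
      ((PySem.List.enumerate xs 0).filter
        (fun p => !(PySem.Set.contains (PySem.Set.ofList ((zIdxN ll 0).map (fun (k : Nat) => (k : Int)))) p.1))).map (fun p => p.2)
      = kIdx ((zIdxN ll 0).reverse) xs 0 := by
    intro b xs
    have hpr : ∀ p ∈ PySem.List.enumerate xs (0 : Int),
        (!(PySem.Set.contains (PySem.Set.ofList ((zIdxN ll 0).map (fun (k : Nat) => (k : Int)))) p.1))
          = (!(decide (p.1 ∈ (zIdxN ll 0).map (fun (k : Nat) => (k : Int))))) := by
      intro p _
      have : PySem.Set.contains (PySem.Set.ofList ((zIdxN ll 0).map (fun (k : Nat) => (k : Int)))) p.1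
          = decide (p.1 ∈ (zIdxN ll 0).map (fun (k : Nat) => (k : Int))) := by
        simp [PySem.Set.contains, PySem.Set.mem_ofList]
      rw [this]
    rw [List.filter_congr hpr]
    have hb2 := B2 (zIdxN ll 0) xs 0
    simp only [Nat.cast_zero] at hb2
    rw [hb2]
    exact kIdx_congr _ _ (fun j => (List.mem_reverse).symm) xs 0
  -- each rebuilt list agrees with A's pop loop
  have hk : ∀ {b : Type} (xs : List b),
      ((zIdxN ll 0).reverse).foldl (fun ys i => ys.eraseIdx i) xs = kIdx ((zIdxN ll 0).reverse) xs 0 :=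
    fun xs => foldl_erase_desc _ hDpw xs
  -- B's export loop agrees with A's
  have hhouses : ((zIdxN ll 0).map (fun (k : Nat) => (k : Int))).reverse.foldl
        (fun acc i => acc ++ [PySem.List.sorted (PySem.Set.ofList (PySem.List.pyGetD hl i [] ++ [PySem.List.pyGetD nl i 0])) (fun v => v) false]) hs
      = hs ++ ((zIdxN ll 0).reverse).map (fun i => PySem.List.sorted (PySem.Set.ofList (hl.getD i [] ++ [nl.getD i 0])) (fun v => v) false) := by
    rw [castRev, PySem.List.foldl_append_singleton_eq_map, List.map_map]
    congr 1
    refine List.map_congr_left ?_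
    intro j _
    simp [PySem.List.pyGetD_natCast]
  rw [hhouses, hfilt nl, hfilt hl, hfilt cl, hfilt ll, hk nl, hk hl, hk cl, hk ll]
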